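-- pv_equiv track=rewrite | github.com/Jarrell-Wi/Mk1 | A-Level/Calc.py | getequation
-- ===== SOURCE A (Python) =====
-- def getequation (choice):
--     operators = ['+', '-', '/', '*', '%']
--     op = ''
--     for i in range(len(choice)):
--         for j in range(len(operators)):
--             if choice[i] == operators[j]:
--                 op = operators[j]
--                 opr = j
--     equation = choice.split(str(op))
--     return(equation, opr)
-- ===== SOURCE B (Python) =====
-- def getequation(choice):
--     operators = '+-/*%'
--     op = next((c for c in reversed(choice) if c in operators), '')
--     equation = choice.split(op)
--     return (equation, operators.index(op))
-- ===== Notes on version B (the rewrite author's own statement) =====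
-- stated objective: simpler
-- what changed: A scans every character with a nested loop over the five operators, overwriting the last match; B scans the string once from the end and stops at the first operator found, recovering its index with operators.index.
import Mathlib
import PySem

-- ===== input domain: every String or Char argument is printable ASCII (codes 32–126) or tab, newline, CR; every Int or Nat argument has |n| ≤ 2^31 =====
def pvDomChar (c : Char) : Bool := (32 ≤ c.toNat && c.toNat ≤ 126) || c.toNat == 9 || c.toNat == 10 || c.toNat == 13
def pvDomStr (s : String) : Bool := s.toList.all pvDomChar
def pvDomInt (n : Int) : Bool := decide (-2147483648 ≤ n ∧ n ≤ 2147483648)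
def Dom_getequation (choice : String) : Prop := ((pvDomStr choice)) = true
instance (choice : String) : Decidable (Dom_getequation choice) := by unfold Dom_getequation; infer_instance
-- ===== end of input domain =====

-- B replaces A's full scan with a nested operator loop by a single backwards scan
-- that stops at the first operator found (simpler decomposition; same cost class).

-- ===== PORT A =====
def getequation (choice : String) : List String × Int :=
  let operators : List Char := ['+', '-', '/', '*', '%']
  let st := choice.toList.foldl
    (fun (st : String × Option Int) c =>
      (List.range operators.length).foldl
        (fun st j =>
          if c = operators.getD j ' ' then (String.ofList [operators.getD j ' '], some (j : Int)) else st)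
        st)
    ("", none)
  (((PySem.Str.split? choice st.1).getD []), st.2.getD 0)

-- ===== PORT B =====
def getequation_alt (choice : String) : List String × Int :=
  let operators : String := "+-/*%"
  let op := ((choice.toList.reverse.find?
      (fun c => PySem.Str.isIn (String.ofList [c]) operators)).map
      (fun c => String.ofList [c])).getD ""
  let equation := (PySem.Str.split? choice op).getD []
  (equation, PySem.Str.find operators op)

-- ===== PRECONDITION & SPEC =====
-- Pre_: the string contains at least one operator character; otherwise Python A
-- raises ValueError from choice.split('') (and opr is unbound), as does B.
def Pre_getequation (choice : String) : Prop :=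
  (choice.toList.any (fun c => c ∈ (['+', '-', '/', '*', '%'] : List Char))) = true
instance (choice : String) : Decidable (Pre_getequation choice) := by unfold Pre_getequation; infer_instance
def pvWitness_getequation : String := "1+2"

def Spec_getequation (choice : String) (out : List String × Int) : Prop := out = getequation_alt choice
instance (choice : String) (out : List String × Int) : Decidable (Spec_getequation choice out) := by unfold Spec_getequation; infer_instance

-- ===== CLAIM (what is proved, stated in full; the proofs are below) =====
def Claim_equal_getequation : Prop := ∀ (choice : String), Dom_getequation choice → Pre_getequation choice → Spec_getequation choice (getequation choice)

-- ===== LEMMAS AND PROOFS =====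

def pvOps : List Char := ['+', '-', '/', '*', '%']

def pvIsOp (c : Char) : Bool := c ∈ pvOps

-- A's inner loop over the five operators, as one step function
lemma pv_stepA (st : String × Option Int) (c : Char) :
    (List.range pvOps.length).foldl
      (fun st j => if c = pvOps.getD j ' ' then (String.ofList [pvOps.getD j ' '], some (j : Int)) else st) st
    = if pvIsOp c then (String.ofList [c], some ((pvOps.idxOf c : Nat) : Int)) else st := by
  have h5 : List.range pvOps.length = [0, 1, 2, 3, 4] := by decide
  rw [h5]
  by_cases h0 : c = '+'
  · subst h0; simp [pvOps, pvIsOp, List.foldl, List.idxOf]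
  · by_cases h1 : c = '-'
    · subst h1; simp [pvOps, pvIsOp, List.foldl, List.idxOf]; decide
    · by_cases h2 : c = '/'
      · subst h2; simp [pvOps, pvIsOp, List.foldl, List.idxOf]; decide
      · by_cases h3 : c = '*'
        · subst h3; simp [pvOps, pvIsOp, List.foldl, List.idxOf]; decide
        · by_cases h4 : c = '%'
          · subst h4; simp [pvOps, pvIsOp, List.foldl, List.idxOf]; decide
          · have hno : pvIsOp c = false := by
              simp [pvIsOp, pvOps, h0, h1, h2, h3, h4]
            simp [pvOps, List.foldl, h0, h1, h2, h3, h4, hno]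

-- A's outer loop computes the last operator character (and its index)
lemma pv_foldA (cs : List Char) :
    cs.foldl
      (fun (st : String × Option Int) c =>
        (List.range pvOps.length).foldl
          (fun st j => if c = pvOps.getD j ' ' then (String.ofList [pvOps.getD j ' '], some (j : Int)) else st) st)
      ("", none)
    = match cs.reverse.find? pvIsOp with
      | none => ("", none)
      | some c => (String.ofList [c], some ((pvOps.idxOf c : Nat) : Int)) := by
  have hfun : (fun (st : String × Option Int) c =>
        (List.range pvOps.length).foldl
          (fun st j => if c = pvOps.getD j ' ' then (String.ofList [pvOps.getD j ' '], some (j : Int)) else st) st)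
      = (fun (st : String × Option Int) c =>
        if pvIsOp c then (String.ofList [c], some ((pvOps.idxOf c : Nat) : Int)) else st) := by
    funext st c; exact pv_stepA st c
  rw [hfun]
  induction cs using List.reverseRecOn with
  | nil => simp
  | append_singleton cs c ih =>
      rw [List.foldl_append]
      simp only [List.foldl_cons, List.foldl_nil, List.reverse_append,
        List.reverse_singleton, List.singleton_append, List.find?]
      by_cases h : pvIsOp c
      · simp [h]
      · simp only [Bool.not_eq_true] at h
        simp [h, ih]

-- B's membership test agrees with pvIsOp
lemma pv_isIn_eq (c : Char) :
    PySem.Str.isIn (String.ofList [c]) "+-/*%" = pvIsOp c := by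
  by_cases h : pvIsOp c
  · simp only [pvIsOp, pvOps, decide_eq_true_eq, List.mem_cons, List.not_mem_nil, or_false] at h
    rcases h with h | h | h | h | h <;> subst h <;> decide
  · simp only [Bool.not_eq_true] at h
    rw [h]
    rw [PySem.Str.isIn_eq]
    rw [Bool.eq_false_iff]
    intro habs
    have hinf := (PySem.Chars.isIn_iff_infix _ _).mp habs
    simp only [String.toList_ofList] at hinf
    have hmem : c ∈ ("+-/*%".toList) := List.singleton_sublist.mp hinf.sublist
    have hl : ("+-/*%".toList) = pvOps := by decide
    rw [hl] at hmem
    simp [pvIsOp, hmem] at h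

-- the Pre_ predicate is pvIsOp
lemma pv_pre_any (choice : String) (h : Pre_getequation choice) :
    choice.toList.reverse.any pvIsOp = true := by
  unfold Pre_getequation at h
  rw [List.any_reverse]
  simpa [pvIsOp, pvOps] using h

-- ===== VERDICT (by name: the statement is the Claim_ definition above) =====
theorem getequation_spec : Claim_equal_getequation := by
  intro choice _hdom hpre
  unfold Spec_getequation getequation getequation_alt
  have hany := pv_pre_any choice hpre
  rw [List.any_eq_true] at hany
  obtain ⟨c₀, hc₀mem, hc₀⟩ := hany
  obtain ⟨c₁, hfind⟩ := Option.isSome_iff_exists.mp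
    (List.find?_isSome.mpr ⟨c₀, hc₀mem, hc₀⟩)
  have hc₁ : pvIsOp c₁ = true := List.find?_some hfind
  have hpred : (fun c => PySem.Str.isIn (String.ofList [c]) ("+-/*%" : String)) = pvIsOp := by
    funext c; exact pv_isIn_eq c
  dsimp only
  have hA := pv_foldA choice.toList
  simp only [pvOps] at hA
  rw [hA]
  simp only [hpred, hfind, Option.map_some, Option.getD_some]
  refine Prod.ext rfl ?_
  simp only
  have hm : c₁ ∈ pvOps := by simpa [pvIsOp] using hc₁
  simp only [pvOps, List.mem_cons, List.not_mem_nil, or_false] at hm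
  rcases hm with h | h | h | h | h <;> subst h <;> decide
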